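-- pv_equiv track=rewrite | github.com/pechang03/processDMRs | biclique_analysis/statistics.py | calculate_node_participation
-- ===== SOURCE A (Python) =====
-- from typing import List, Dict, Tuple, Set
--
-- def calculate_node_participation(bicliques: List[Tuple[Set[int], Set[int]]]) -> Dict:
--     """Calculate how many nodes participate in multiple bicliques."""
--     dmr_participation = {}
--     gene_participation = {}
--
--     # First count participation for each node
--     for dmr_nodes, gene_nodes in bicliques:
--         for node in dmr_nodes:
--             dmr_participation[node] = dmr_participation.get(node, 0) + 1
--         for node in gene_nodes:
--             gene_participation[node] = gene_participation.get(node, 0) + 1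
--
--     # Convert to count distribution
--     dmr_dist = {}
--     gene_dist = {}
--
--     # Count nodes by their participation frequency
--     for count in sorted(set(dmr_participation.values())):
--         dmr_dist[count] = sum(1 for v in dmr_participation.values() if v == count)
--     for count in sorted(set(gene_participation.values())):
--         gene_dist[count] = sum(1 for v in gene_participation.values() if v == count)
--
--     return {"dmrs": dmr_dist, "genes": gene_dist}
-- ===== SOURCE B (Python) =====
-- from typing import List, Dict, Tuple, Set
--
--
-- def _distribution(nodes) -> Dict:
--     """Frequency distribution of the participation counts: one run-length pass over the sorted values."""
--     participation = {}
--     for node in nodes: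
--         participation[node] = participation.get(node, 0) + 1
--     values = sorted(participation.values())
--     dist = {}
--     i, n = 0, len(values)
--     while i < n:
--         j = i
--         while j < n and values[j] == values[i]:
--             j += 1
--         dist[values[i]] = j - i
--         i = j
--     return dist
--
--
-- def calculate_node_participation(bicliques: List[Tuple[Set[int], Set[int]]]) -> Dict:
--     """Calculate how many nodes participate in multiple bicliques."""
--     return {
--         "dmrs": _distribution(n for dmrs, _ in bicliques for n in dmrs),
--         "genes": _distribution(n for _, genes in bicliques for n in genes),
--     }
-- ===== Notes on version B (the rewrite author's own statement) =====
-- stated objective: alternative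
-- what changed: B flattens each side's node sets into one stream counted by a single shared helper, then builds each distribution in one run-length pass over the sorted participation values instead of A's sorted(set(values)) loop with a full sum() rescan per distinct count.
import Mathlib
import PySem

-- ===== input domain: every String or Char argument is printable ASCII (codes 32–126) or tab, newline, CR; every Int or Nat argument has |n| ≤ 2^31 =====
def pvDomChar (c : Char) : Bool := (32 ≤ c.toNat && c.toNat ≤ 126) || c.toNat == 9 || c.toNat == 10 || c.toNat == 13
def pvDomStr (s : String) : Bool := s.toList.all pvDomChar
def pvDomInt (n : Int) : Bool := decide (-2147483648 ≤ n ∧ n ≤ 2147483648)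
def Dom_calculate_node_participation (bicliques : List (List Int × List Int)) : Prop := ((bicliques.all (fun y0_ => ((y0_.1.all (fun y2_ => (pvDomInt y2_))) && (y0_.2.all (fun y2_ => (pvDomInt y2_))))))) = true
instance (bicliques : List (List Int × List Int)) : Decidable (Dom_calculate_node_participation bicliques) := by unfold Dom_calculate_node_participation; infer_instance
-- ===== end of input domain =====

-- B counts each side via one flattened stream and builds each distribution in one
-- run-length pass over the sorted values instead of A's per-distinct-count rescan.

-- ===== PORT A =====
def calculate_node_participation (bicliques : List (List Int × List Int)) : List (String × List (Int × Int)) :=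
  -- for dmr_nodes, gene_nodes in bicliques: participation[node] = participation.get(node, 0) + 1
  let p := bicliques.foldl
    (fun (s : PySem.Dict Int Int × PySem.Dict Int Int) bc =>
      (bc.1.foldl (fun d node => d.insert node (d.getD node 0 + 1)) s.1,
       bc.2.foldl (fun d node => d.insert node (d.getD node 0 + 1)) s.2))
    (PySem.Dict.empty, PySem.Dict.empty)
  -- for count in sorted(set(participation.values())): dist[count] = sum(1 for v in values if v == count)
  let dmr_dist := (PySem.List.sorted (PySem.Set.ofList p.1.values) (fun x => x) false).foldl
    (fun dist c => dist.insert c (p.1.values.foldl (fun acc v => if v == c then acc + 1 else acc) 0))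
    PySem.Dict.empty
  let gene_dist := (PySem.List.sorted (PySem.Set.ofList p.2.values) (fun x => x) false).foldl
    (fun dist c => dist.insert c (p.2.values.foldl (fun acc v => if v == c then acc + 1 else acc) 0))
    PySem.Dict.empty
  [("dmrs", dmr_dist.items), ("genes", gene_dist.items)]

-- ===== PORT B =====
-- the inner while-loops of Source B's _distribution: one run-length pass over the sorted values
def pvRuns (values : List Int) : List (Int × Int) :=
  match values with
  | [] => []
  | x :: rest =>
      (x, 1 + ((rest.takeWhile (fun y => y == x)).length : Int)) ::
        pvRuns (rest.dropWhile (fun y => y == x))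
termination_by values.length
decreasing_by
  exact Nat.lt_succ_of_le (List.dropWhile_sublist _).length_le

def pvDistribution (nodes : List Int) : List (Int × Int) :=
  let participation := nodes.foldl (fun d node => d.insert node (d.getD node 0 + 1)) PySem.Dict.empty
  pvRuns (PySem.List.sorted participation.values (fun x => x) false)

def calculate_node_participation_alt (bicliques : List (List Int × List Int)) : List (String × List (Int × Int)) :=
  [("dmrs", pvDistribution (bicliques.flatMap (fun bc => bc.1))),
   ("genes", pvDistribution (bicliques.flatMap (fun bc => bc.2)))]

-- ===== PRECONDITION & SPEC =====
def Spec_calculate_node_participation (bicliques : List (List Int × List Int)) (out : List (String × List (Int × Int))) : Prop := out = calculate_node_participation_alt bicliques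
instance (bicliques : List (List Int × List Int)) (out : List (String × List (Int × Int))) : Decidable (Spec_calculate_node_participation bicliques out) := by unfold Spec_calculate_node_participation; infer_instance

-- ===== CLAIM (what is proved, stated in full; the proofs are below) =====
def Claim_equal_calculate_node_participation : Prop := ∀ (bicliques : List (List Int × List Int)), Dom_calculate_node_participation bicliques → Spec_calculate_node_participation bicliques (calculate_node_participation bicliques)

-- ===== LEMMAS AND PROOFS =====

-- the nested counting loop over the pairs equals one counting loop over the flattened stream
lemma pv_foldl_foldl_flatMap (l : List (List Int × List Int)) (pick : List Int × List Int → List Int)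
    (d : PySem.Dict Int Int) :
    l.foldl (fun d bc => (pick bc).foldl (fun d node => d.insert node (d.getD node 0 + 1)) d) d
      = (l.flatMap pick).foldl (fun d node => d.insert node (d.getD node 0 + 1)) d := by
  induction l generalizing d with
  | nil => rfl
  | cons bc l ih => simp [List.flatMap_cons, List.foldl_append, ih]

lemma pv_foldl_add_of_mem (t : List Int) : ∀ s : List Int, (∀ y ∈ t, y ∈ s) →
    t.foldl PySem.Set.add s = s := by
  induction t with
  | nil => intro s _; rfl
  | cons y t ih =>
      intro s hs
      have hy : PySem.Set.add s y = s := by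
        simp [PySem.Set.add, PySem.Set.contains, hs y (by simp)]
      simpa [hy] using ih s (fun z hz => hs z (by simp [hz]))

lemma pv_foldl_add_cons (r : List Int) : ∀ (s : List Int) (a : Int), a ∉ r →
    r.foldl PySem.Set.add (a :: s) = a :: r.foldl PySem.Set.add s := by
  induction r with
  | nil => intro s a _; rfl
  | cons y r ih =>
      intro s a ha
      have hya : y ≠ a := fun h => ha (by simp [h])
      have hstep : PySem.Set.add (a :: s) y = a :: PySem.Set.add s y := by
        simp [PySem.Set.add, PySem.Set.contains, hya]
        split_ifs <;> simp_all
      rw [List.foldl_cons, hstep, List.foldl_cons, ih _ a (fun h => ha (by simp [h]))]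

lemma pv_ofList_run_cons (x : Int) (t r : List Int) (ht : ∀ y ∈ t, y = x) (hr : x ∉ r) :
    PySem.Set.ofList (x :: (t ++ r)) = x :: PySem.Set.ofList r := by
  rw [PySem.Set.ofList_eq_foldl, PySem.Set.ofList_eq_foldl]
  have h0 : PySem.Set.add [] x = [x] := by simp [PySem.Set.add, PySem.Set.contains]
  rw [List.foldl_cons, h0, List.foldl_append,
    pv_foldl_add_of_mem t [x] (fun y hy => by simp [ht y hy]),
    pv_foldl_add_cons r [] x hr]

lemma pv_ofList_sublist (l : List Int) : (PySem.Set.ofList l).Sublist l := by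
  have key : ∀ (l s : List Int), (l.foldl PySem.Set.add s).Sublist (s ++ l) := by
    intro l
    induction l with
    | nil => simp
    | cons x l ih =>
        intro s
        refine (ih (PySem.Set.add s x)).trans ?_
        by_cases hx : PySem.Set.contains s x = true
        · simp only [PySem.Set.add, hx, if_true]
          exact List.Sublist.append_left (List.sublist_cons_self x l) s
        · simp only [PySem.Set.add, hx]
          simp [List.append_assoc]
  simpa using key l []

lemma pvRuns_sorted (ws : List Int) (h : ws.Pairwise (· ≤ ·)) :
    pvRuns ws = (PySem.Set.ofList ws).map (fun c => (c, (ws.count c : Int))) := by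
  induction ws using pvRuns.induct with
  | case1 => simp [pvRuns]
  | case2 x rest ih =>
      have hxle : ∀ z ∈ rest, x ≤ z := (List.pairwise_cons.1 h).1
      have hrestp : rest.Pairwise (· ≤ ·) := (List.pairwise_cons.1 h).2
      have hrest : rest.takeWhile (fun y => y == x) ++ rest.dropWhile (fun y => y == x) = rest :=
        List.takeWhile_append_dropWhile
      set t := rest.takeWhile (fun y => y == x) with htdef
      set r := rest.dropWhile (fun y => y == x) with hrdef
      have ht : ∀ y ∈ t, y = x := fun y hy => by simpa using List.mem_takeWhile_imp hy
      have h2 : (t ++ r).Pairwise (· ≤ ·) := by rw [hrest]; exact hrestp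
      have hrp : r.Pairwise (· ≤ ·) := (List.pairwise_append.1 h2).2.1
      have hsub : r.Sublist rest := by rw [hrdef]; exact List.dropWhile_sublist _
      have hr : x ∉ r := by
        intro hx
        cases hcr : r with
        | nil => rw [hcr] at hx; simp at hx
        | cons y r' =>
            have hpy : (y == x) = false := by
              have h1 := List.head?_dropWhile_not (fun y => y == x) rest
              rw [← hrdef, hcr] at h1
              simpa using h1
            have hyx : y ≠ x := by simpa using hpy
            have hymem : y ∈ rest := hsub.mem (by rw [hcr]; simp)
            have hxy : x ≤ y := hxle y hymem
            rw [hcr] at hx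
            rcases List.mem_cons.1 hx with h' | h'
            · exact hyx h'.symm
            · have hrp' := hrp
              rw [hcr] at hrp'
              exact hyx (le_antisymm ((List.pairwise_cons.1 hrp').1 x h') hxy)
      have hcount_t : t.count x = t.length := List.count_eq_length.2 (fun y hy => (ht y hy).symm)
      have hcount_r : r.count x = 0 := List.count_eq_zero.2 hr
      have hofl : PySem.Set.ofList (x :: rest) = x :: PySem.Set.ofList r := by
        conv_lhs => rw [← hrest]
        exact pv_ofList_run_cons x t r ht hr
      have hcx : ∀ c, c ∈ r → (x :: rest).count c = r.count c := by
        intro c hcr'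
        have hcxne : c ≠ x := fun hh => hr (hh ▸ hcr')
        have hct : c ∉ t := fun hh => hcxne (ht c hh)
        conv_lhs => rw [← hrest]
        simp [List.count_cons, List.count_append, List.count_eq_zero.2 hct]
        exact fun hh => hcxne hh.symm
      have hcountx : ((x :: rest).count x : Int) = 1 + (t.length : Int) := by
        conv_lhs => rw [← hrest]
        simp [List.count_append, hcount_t, hcount_r]
        ring
      rw [pvRuns, hofl, List.map_cons]
      congr 1
      · rw [hcountx]
      · rw [ih hrp]
        exact (List.map_congr_left fun c hc =>
          by rw [hcx c ((PySem.Set.mem_ofList r c).1 hc)]).symm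

lemma pv_dist_eq (vals : List Int) :
    ((PySem.List.sorted (PySem.Set.ofList vals) (fun x => x) false).foldl
       (fun dist c => dist.insert c (vals.foldl (fun acc v => if v == c then acc + 1 else acc) 0))
       PySem.Dict.empty).items
    = pvRuns (PySem.List.sorted vals (fun x => x) false) := by
  have hSnd : (PySem.List.sorted (PySem.Set.ofList vals) (fun x => x) false).Nodup :=
    (PySem.List.sorted_perm (PySem.Set.ofList vals) (fun x => x) false).nodup_iff.2
      (PySem.Set.nodup_ofList vals)
  have hA : ((PySem.List.sorted (PySem.Set.ofList vals) (fun x => x) false).foldl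
       (fun dist c => dist.insert c (vals.foldl (fun acc v => if v == c then acc + 1 else acc) 0))
       PySem.Dict.empty).items
      = (PySem.List.sorted (PySem.Set.ofList vals) (fun x => x) false).map
          (fun c => (c, (vals.count c : Int))) := by
    rw [PySem.Dict.items_foldl_insert_fresh _ (fun c => c)
      (fun c => vals.foldl (fun acc v => if v == c then acc + 1 else acc) 0) _
      (fun a _ => PySem.Dict.contains_empty a) (by simpa using hSnd)]
    simp only [show (PySem.Dict.empty : PySem.Dict Int Int).items = [] from rfl, List.nil_append]
    refine List.map_congr_left fun a _ => ?_
    rw [PySem.List.foldl_beq_add_one]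
    simp
  -- B side: run-length pass over the sorted values
  have hw : pvRuns (PySem.List.sorted vals (fun x => x) false)
      = (PySem.Set.ofList (PySem.List.sorted vals (fun x => x) false)).map
          (fun c => (c, ((PySem.List.sorted vals (fun x => x) false).count c : Int))) :=
    pvRuns_sorted _ (by simpa using PySem.List.sorted_pairwise vals (fun x => x))
  have hperm : (PySem.List.sorted vals (fun x => x) false).Perm vals :=
    PySem.List.sorted_perm vals (fun x => x) false
  have hkeys : PySem.List.sorted (PySem.Set.ofList vals) (fun x => x)
      = PySem.Set.ofList (PySem.List.sorted vals (fun x => x) false) := by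
    apply PySem.List.sorted_eq_of_perm_of_pairwise_lt
    · refine (List.perm_ext_iff_of_nodup (PySem.Set.nodup_ofList _) (PySem.Set.nodup_ofList _)).2 ?_
      intro a
      rw [PySem.Set.mem_ofList, PySem.Set.mem_ofList, hperm.mem_iff]
    · have hsorted : (PySem.List.sorted vals (fun x => x) false).Pairwise (· ≤ ·) := by
        simpa using PySem.List.sorted_pairwise vals (fun x => x)
      have hle : (PySem.Set.ofList (PySem.List.sorted vals (fun x => x) false)).Pairwise (· ≤ ·) :=
        List.Pairwise.sublist (pv_ofList_sublist _) hsorted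
      have hnd : (PySem.Set.ofList (PySem.List.sorted vals (fun x => x) false)).Pairwise (· ≠ ·) :=
        PySem.Set.nodup_ofList _
      exact (hle.and hnd).imp (fun h => lt_of_le_of_ne h.1 h.2)
  rw [hA, hw, hkeys]
  exact List.map_congr_left (fun c _ => by rw [hperm.count_eq])

-- ===== VERDICT (by name: the statement is the Claim_ definition above) =====
theorem calculate_node_participation_spec : Claim_equal_calculate_node_participation := by
  intro bicliques _
  show calculate_node_participation bicliques = calculate_node_participation_alt bicliques
  have hsplit := PySem.List.foldl_prod_mk
    (fun (d : PySem.Dict Int Int) (bc : List Int × List Int) =>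
      bc.1.foldl (fun d node => d.insert node (d.getD node 0 + 1)) d)
    (fun (d : PySem.Dict Int Int) (bc : List Int × List Int) =>
      bc.2.foldl (fun d node => d.insert node (d.getD node 0 + 1)) d)
    bicliques PySem.Dict.empty PySem.Dict.empty
  simp only [calculate_node_participation, calculate_node_participation_alt, pvDistribution,
    hsplit, pv_foldl_foldl_flatMap, pv_dist_eq]
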